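-- pv_equiv track=rewrite | github.com/981377660LMT/algorithm-study | 1_stack/单调栈/下k个最大元素/对每个数寻找右侧第k个比自己大的数.py | kthGreaterElement
-- ===== SOURCE A (Python) =====
-- from typing import List
--
-- def kthGreaterElement(nums: List[int], k: int) -> List[int]:
--     """
--     - 求每个数右侧下一个`严格大于`它的第k个数的`索引` (kth next greater)
--     - `不存在为n`
--     - 时间复杂度 O(n*k)
--
--     !k次单调栈
--     !第一个单调栈pop出去的元素放到第二个单调栈里面
--     !第二个单调栈pop出去的元素放到第三个单调栈里面
--     !...
--     !第k个单调栈再被pop时统计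
--     """
--
--     n = len(nums)
--     res = [n] * n
--     stacks = [[] for _ in range(k)]
--     tmp = []
--     for i in range(n):
--         # 从最后一个单调栈开始处理
--         for j in range(k - 1, -1, -1):
--             while stacks[j] and nums[stacks[j][-1]] < nums[i]:  # 严格大于
--                 top = stacks[j].pop()
--                 if j == k - 1:
--                     res[top] = i
--                 else:
--                     tmp.append(top)
--             if j + 1 < k:
--                 # 倒序进入下一个单调栈，保证所有单调栈的单调性
--                 while tmp:
--                     stacks[j + 1].append(tmp.pop())
--         stacks[0].append(i)
--     return res
-- ===== SOURCE B (Python) =====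
-- from typing import List
--
-- def kthGreaterElement(nums: List[int], k: int) -> List[int]:
--     """For each i, index of the k-th strictly greater element to its right (n if absent):
--     a direct one-pass-per-index scan counting strictly greater elements."""
--     n = len(nums)
--     res = []
--     for i in range(n):
--         ans = n
--         cnt = 0
--         for j in range(i + 1, n):
--             if nums[j] > nums[i]:
--                 cnt += 1
--                 if cnt == k:
--                     ans = j
--                     break
--         res.append(ans)
--     return res
-- ===== Notes on version B (the rewrite author's own statement) =====
-- stated objective: simpler
-- what changed: Replaces the cascade of k monotonic stacks (pop from stack j feeds stack j+1, count at stack k-1) by a direct per-index rightward scan that counts strictly greater elements and stops at the k-th.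
-- crash fix: On k <= 0 with a non-empty list A raises IndexError (stacks[0] does not exist); B returns [n]*n since no index ever reaches a k-th greater element. — e.g. on kthGreaterElement([5, 1], 0): A raises IndexError, B returns [2, 2]
import Mathlib
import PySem

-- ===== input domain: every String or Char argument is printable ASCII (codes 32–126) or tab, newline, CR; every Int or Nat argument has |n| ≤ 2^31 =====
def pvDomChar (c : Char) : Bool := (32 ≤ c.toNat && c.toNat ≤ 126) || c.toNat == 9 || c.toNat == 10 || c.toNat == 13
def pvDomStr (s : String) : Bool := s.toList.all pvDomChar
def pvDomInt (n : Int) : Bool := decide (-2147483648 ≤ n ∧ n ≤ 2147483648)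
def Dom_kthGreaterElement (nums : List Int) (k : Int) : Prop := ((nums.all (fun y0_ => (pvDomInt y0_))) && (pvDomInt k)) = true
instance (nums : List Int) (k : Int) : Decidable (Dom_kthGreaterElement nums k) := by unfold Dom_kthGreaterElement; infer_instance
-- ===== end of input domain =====

-- B replaces A's cascade of k monotonic stacks by a direct per-index rightward counting scan
-- (simpler, not faster). A mutates nothing observable; equivalence is about the return value.
-- Python lists used as stacks are ported with the head as the stack top (append/pop at the
-- Python end = cons/uncons at the Lean head, applied consistently to stacks and tmp).

-- ===== PORT A =====
-- while stacks[j] and nums[stacks[j][-1]] < nums[i]: top = stacks[j].pop(); collect top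
-- returns (popped tops in pop order, remaining stack)
def pvPops (nums : List Int) (x : Int) : List Nat → List Nat × List Nat
  | [] => ([], [])
  | t :: rest =>
    if nums.getD t 0 < x then
      let pr := pvPops nums x rest
      (t :: pr.1, pr.2)
    else ([], t :: rest)

-- while tmp: stacks[j+1].append(tmp.pop())
def pvTransfer : List Nat → List Nat → List Nat
  | [], st => st
  | t :: rest, st => pvTransfer rest (t :: st)

-- the inner 'for j in range(k-1, -1, -1)' loop, one call per j, recursing downwards
-- (the stack list is an Array, matching Python's O(1) indexing of `stacks`)
def pvInner (nums : List Int) (i : Nat) (kn : Nat) :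
    Nat → List Int × Array (List Nat) × List Nat → List Int × Array (List Nat) × List Nat
  | j, s =>
    match s with
    | (rs, stks, tm0) =>
      let x := nums.getD i 0
      let pr := pvPops nums x (stks.getD j [])
      let stacks' := stks.setIfInBounds j pr.2
      let res' := if j = kn - 1 then pr.1.foldl (fun rr t => rr.set t (Int.ofNat i)) rs else rs
      let tmp' := if j = kn - 1 then tm0 else pr.1.foldl (fun tm t => t :: tm) tm0
      let st2 : Array (List Nat) × List Nat :=
        if j + 1 < kn then
          let recv := stacks'.getD (j+1) []
          (stacks'.setIfInBounds (j+1) (pvTransfer tmp' recv), [])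
        else (stacks', tmp')
      match j with
      | 0 => (res', st2.1, st2.2)
      | j' + 1 => pvInner nums i kn j' (res', st2.1, st2.2)

def kthGreaterElement (nums : List Int) (k : Int) : List Int :=
  let n := nums.length
  let kn := k.toNat
  ((List.range n).foldl
    (fun (s : List Int × Array (List Nat) × List Nat) i =>
      -- 'for j in range(k-1,-1,-1)' runs zero iterations when k ≤ 0
      let s' := if kn = 0 then s else pvInner nums i kn (kn - 1) s
      match s' with
      | (rs, stks, tm0) =>
        let h0 := stks.getD 0 []
        (rs, stks.setIfInBounds 0 (i :: h0), tm0))   -- stacks[0].append(i)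
    (List.replicate n (Int.ofNat n), (List.replicate kn ([] : List Nat)).toArray, [])).1

-- ===== PORT B =====
-- the inner 'for j in range(i+1, n): …' loop with its break
def pvAltInner (nums : List Int) (k x : Int) : List Nat → Int → Int → Int
  | [], _, ans => ans
  | j :: rest, cnt, ans =>
    if x < nums.getD j 0 then
      if cnt + 1 = k then Int.ofNat j
      else pvAltInner nums k x rest (cnt + 1) ans
    else pvAltInner nums k x rest cnt ans

def kthGreaterElement_alt (nums : List Int) (k : Int) : List Int :=
  let n := nums.length
  (List.range n).foldl
    (fun res i =>
      res ++ [pvAltInner nums k (nums.getD i 0) (List.range' (i+1) (n - (i+1))) 0 (Int.ofNat n)])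
    []

-- ===== PRECONDITION & SPEC =====
-- Pre_ excludes exactly the inputs where A raises: with a non-empty list and k ≤ 0,
-- 'stacks[0].append(i)' raises IndexError (stacks has no entries).
def Pre_kthGreaterElement (nums : List Int) (k : Int) : Prop := nums = [] ∨ 1 ≤ k
instance (nums : List Int) (k : Int) : Decidable (Pre_kthGreaterElement nums k) := by
  unfold Pre_kthGreaterElement; infer_instance

def pvWitness_kthGreaterElement : List Int × Int := ([2, 1, 3], 1)

-- On k ≤ 0 with a non-empty list A raises IndexError; B returns [n]*n (no k-th greater exists).
def Raises_kthGreaterElement (nums : List Int) (k : Int) : Prop := nums ≠ [] ∧ k ≤ 0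
instance (nums : List Int) (k : Int) : Decidable (Raises_kthGreaterElement nums k) := by
  unfold Raises_kthGreaterElement; infer_instance
def pvRaiseWitness_kthGreaterElement : List Int × Int := ([5, 1], 0)
def pvRaiseWitnessOut_kthGreaterElement : List Int := [2, 2]

def Spec_kthGreaterElement (nums : List Int) (k : Int) (out : List Int) : Prop :=
  out = kthGreaterElement_alt nums k
instance (nums : List Int) (k : Int) (out : List Int) : Decidable (Spec_kthGreaterElement nums k out) := by
  unfold Spec_kthGreaterElement; infer_instance

-- ===== CLAIM (what is proved, stated in full; the proofs are below) =====
def Claim_equal_kthGreaterElement : Prop := ∀ (nums : List Int) (k : Int),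
  Dom_kthGreaterElement nums k → Pre_kthGreaterElement nums k →
  Spec_kthGreaterElement nums k (kthGreaterElement nums k)

def Claim_raises_kthGreaterElement : Prop :=
  (∀ (nums : List Int) (k : Int), Dom_kthGreaterElement nums k →
      Raises_kthGreaterElement nums k → ¬ Pre_kthGreaterElement nums k) ∧
  (Dom_kthGreaterElement (pvRaiseWitness_kthGreaterElement.1) (pvRaiseWitness_kthGreaterElement.2) ∧
   Raises_kthGreaterElement (pvRaiseWitness_kthGreaterElement.1) (pvRaiseWitness_kthGreaterElement.2) ∧
   kthGreaterElement_alt (pvRaiseWitness_kthGreaterElement.1) (pvRaiseWitness_kthGreaterElement.2) =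
     pvRaiseWitnessOut_kthGreaterElement)

-- ===== LEMMAS AND PROOFS =====

-- the number of strictly greater elements at positions in (t, i)
def pvKp (nums : List Int) (t i : Nat) : List Nat :=
  (List.range' (t+1) (i - (t+1))).filter (fun s => decide (nums.getD t 0 < nums.getD s 0))
def pvCnt (nums : List Int) (t i : Nat) : Nat := (pvKp nums t i).length

-- value of res[t] once the prefix nums[0:i] has been processed
def pvResSpec (nums : List Int) (kn n t i : Nat) : Int :=
  if kn ≤ pvCnt nums t i then Int.ofNat ((pvKp nums t i).getD (kn - 1) 0) else Int.ofNat n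
def pvResL (nums : List Int) (kn n i : Nat) : List Int :=
  (List.range n).map (fun t => pvResSpec nums kn n t i)

-- stack j once nums[0:i] has been processed: the t < i with exactly j greater elements in (t, i),
-- top (= head) holding the largest index
def pvStk (nums : List Int) (j i : Nat) : List Nat :=
  ((List.range i).filter (fun t => decide (pvCnt nums t i = j))).reverse
def pvStacks (nums : List Int) (kn i : Nat) : List (List Nat) :=
  (List.range kn).map (fun j => pvStk nums j i)
-- stack j popped at step i but not yet fed from stack j-1
def pvStkMid (nums : List Int) (j i : Nat) : List Nat :=
  ((List.range i).filter
    (fun t => decide (pvCnt nums t i = j) && ! decide (nums.getD t 0 < nums.getD i 0))).reverse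


def pvPopped (nums : List Int) (j i : Nat) : List Nat :=
  ((List.range i).filter
    (fun t => decide (pvCnt nums t i = j) && decide (nums.getD t 0 < nums.getD i 0))).reverse

-- stacks when the inner loop is about to process index j (stacks ≤ j untouched at time i,
-- stack j+1 already popped, stacks above j+1 already final for time i+1)
def pvPreSt (nums : List Int) (kn i j : Nat) : List (List Nat) :=
  (List.range kn).map (fun j' =>
    if j' ≤ j then pvStk nums j' i
    else if j' = j + 1 then pvStkMid nums (j+1) i
    else pvStk nums j' (i+1))

-- stacks after the inner loop: stack 0 still waiting for i to be appended
def pvPostSt (nums : List Int) (kn i : Nat) : List (List Nat) :=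
  (List.range kn).map (fun j' => if j' = 0 then pvStkMid nums 0 i else pvStk nums j' (i+1))

lemma pv_mem_Kp {nums : List Int} {t i s : Nat} :
    s ∈ pvKp nums t i ↔ t + 1 ≤ s ∧ s < i ∧ nums.getD t 0 < nums.getD s 0 := by
  unfold pvKp
  simp only [List.mem_filter, List.mem_range'_1, decide_eq_true_eq]
  constructor
  · rintro ⟨⟨h1, h2⟩, h3⟩; exact ⟨h1, by omega, h3⟩
  · rintro ⟨h1, h2, h3⟩; exact ⟨⟨h1, by omega⟩, h3⟩

lemma pv_pairwise_filter_range (p : Nat → Bool) (i : Nat) :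
    ((List.range i).filter p).Pairwise (· < ·) :=
  List.Pairwise.filter _ (List.pairwise_lt_range)

lemma pv_cnt_mono {nums : List Int} {t1 t2 i : Nat} (h12 : t1 < t2) (h2i : t2 < i)
    (hv : nums.getD t1 0 < nums.getD t2 0) : pvCnt nums t2 i < pvCnt nums t1 i := by
  have hsub : t2 :: pvKp nums t2 i ⊆ pvKp nums t1 i := by
    intro s hs
    rcases List.mem_cons.mp hs with rfl | hs
    · exact pv_mem_Kp.mpr ⟨by omega, h2i, hv⟩
    · have h := pv_mem_Kp.mp hs
      exact pv_mem_Kp.mpr ⟨by omega, h.2.1, lt_trans hv h.2.2⟩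
  have hnd : (t2 :: pvKp nums t2 i).Nodup := by
    refine List.nodup_cons.mpr ⟨?_, List.Nodup.filter _ List.nodup_range'⟩
    intro h; have := pv_mem_Kp.mp h; omega
  have hle := (List.subperm_of_subset hnd hsub).length_le
  simp only [List.length_cons] at hle
  simpa [pvCnt] using hle

lemma pv_Kp_succ {nums : List Int} {t i : Nat} (ht : t < i) :
    pvKp nums t (i+1) =
      pvKp nums t i ++ (if nums.getD t 0 < nums.getD i 0 then [i] else []) := by
  unfold pvKp
  have h1 : i + 1 - (t+1) = (i - (t+1)) + 1 := by omega
  have h2 : t + 1 + (i - (t+1)) = i := by omega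
  rw [h1, List.range'_1_concat, h2, List.filter_append]
  congr 1
  simp only [List.filter_singleton]
  by_cases hl : nums.getD t 0 < nums.getD i 0 <;> simp [hl]

lemma pv_cnt_succ {nums : List Int} {t i : Nat} (ht : t < i) :
    pvCnt nums t (i+1) = pvCnt nums t i + (if nums.getD t 0 < nums.getD i 0 then 1 else 0) := by
  unfold pvCnt
  rw [pv_Kp_succ ht, List.length_append]
  congr 1
  split <;> rfl

lemma pv_Kp_ge {nums : List Int} {t i : Nat} (ht : i ≤ t) :
    pvKp nums t (i+1) = pvKp nums t i := by
  unfold pvKp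
  have h1 : i + 1 - (t+1) = 0 := by omega
  have h2 : i - (t+1) = 0 := by omega
  rw [h1, h2]

lemma pv_cnt_zero {nums : List Int} {t i : Nat} (h : i ≤ t + 1) : pvCnt nums t i = 0 := by
  have h1 : i - (t+1) = 0 := by omega
  simp [pvCnt, pvKp, h1]

lemma pv_pops_eq (nums : List Int) (x : Int) : ∀ st : List Nat,
    pvPops nums x st =
      (st.takeWhile (fun t => decide (nums.getD t 0 < x)),
       st.dropWhile (fun t => decide (nums.getD t 0 < x))) := by
  intro st
  induction st with
  | nil => simp [pvPops]
  | cons a rest ih =>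
    simp [pvPops, ih, List.takeWhile_cons, List.dropWhile_cons]
    split <;> rfl

lemma pv_tw_dw {α : Type} (p : α → Bool) : ∀ l : List α,
    l.Pairwise (fun a b => p b = true → p a = true) →
    l.takeWhile p = l.filter p ∧ l.dropWhile p = l.filter (fun a => ! p a) := by
  intro l
  induction l with
  | nil => simp
  | cons a rest ih =>
    intro hp
    have hp' := List.pairwise_cons.mp hp
    by_cases h : p a = true
    · have h2 := ih hp'.2
      simp [List.takeWhile_cons, List.dropWhile_cons, List.filter_cons, h, h2.1, h2.2]
    · have hall : ∀ b ∈ rest, ¬ p b = true := fun b hb hpb => h (hp'.1 b hb hpb)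
      have h1 : rest.filter p = [] := List.filter_eq_nil_iff.mpr hall
      have h2 : rest.filter (fun a => ! p a) = rest :=
        List.filter_eq_self.mpr (fun b hb => by simp [hall b hb])
      simp [List.takeWhile_cons, List.dropWhile_cons, List.filter_cons, h, h1, h2]

lemma pv_stk_pairwise (nums : List Int) (x : Int) (j i : Nat) :
    (pvStk nums j i).Pairwise
      (fun a b => decide (nums.getD b 0 < x) = true → decide (nums.getD a 0 < x) = true) := by
  unfold pvStk
  rw [List.pairwise_reverse]
  have h1 := pv_pairwise_filter_range (fun t => decide (pvCnt nums t i = j)) i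
  refine h1.imp_of_mem ?_
  intro a b ha hb hab
  simp only [List.mem_filter, List.mem_range, decide_eq_true_eq] at ha hb
  simp only [decide_eq_true_eq]
  intro hax
  by_cases hv : nums.getD a 0 < nums.getD b 0
  · have := pv_cnt_mono hab hb.1 hv
    omega
  · exact lt_of_le_of_lt (not_lt.mp hv) hax

lemma pv_pops_stk (nums : List Int) (j i : Nat) :
    pvPops nums (nums.getD i 0) (pvStk nums j i) = (pvPopped nums j i, pvStkMid nums j i) := by
  rw [pv_pops_eq]
  obtain ⟨h1, h2⟩ := pv_tw_dw _ _ (pv_stk_pairwise nums (nums.getD i 0) j i)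
  rw [h1, h2]
  unfold pvStk pvPopped pvStkMid
  rw [List.filter_reverse, List.filter_reverse, List.filter_filter, List.filter_filter]
  have h3 : ∀ (l : List Nat) (f g : Nat → Bool),
      l.filter (fun a => f a && g a) = l.filter (fun a => g a && f a) :=
    fun l f g => List.filter_congr (fun a _ => Bool.and_comm (f a) (g a))
  exact congrArg₂ Prod.mk (congrArg List.reverse (h3 _ _ _)) (congrArg List.reverse (h3 _ _ _))

lemma pv_sorted_eq : ∀ {l1 l2 : List Nat}, l1.Pairwise (· < ·) → l2.Pairwise (· < ·) →
    (∀ a, a ∈ l1 ↔ a ∈ l2) → l1 = l2 := by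
  intro l1
  induction l1 with
  | nil =>
    intro l2 _ _ hm
    cases l2 with
    | nil => rfl
    | cons b t2 => have := (hm b).mpr (by simp); simp at this
  | cons a t ih =>
    intro l2 h1 h2 hm
    cases l2 with
    | nil => have := (hm a).mp (by simp); simp at this
    | cons b t2 =>
      have h1' := List.pairwise_cons.mp h1
      have h2' := List.pairwise_cons.mp h2
      have hab : a = b := by
        by_contra hne
        have ha2 : a ∈ b :: t2 := (hm a).mp (by simp)
        have hb1 : b ∈ a :: t := (hm b).mpr (by simp)
        rcases List.mem_cons.mp ha2 with h | h
        · exact hne h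
        rcases List.mem_cons.mp hb1 with h' | h'
        · exact hne h'.symm
        have c1 := h1'.1 b h'
        have c2 := h2'.1 a h
        omega
      subst hab
      have htail : t = t2 := by
        refine ih h1'.2 h2'.2 ?_
        intro c
        constructor
        · intro hc
          rcases List.mem_cons.mp ((hm c).mp (List.mem_cons_of_mem a hc)) with rfl | h
          · exact absurd (h1'.1 c hc) (lt_irrefl c)
          · exact h
        · intro hc
          rcases List.mem_cons.mp ((hm c).mpr (List.mem_cons_of_mem a hc)) with rfl | h
          · exact absurd (h2'.1 c hc) (lt_irrefl c)
          · exact h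
      rw [htail]

lemma pv_merge (nums : List Int) (i j : Nat) :
    (List.range i).filter
        (fun t => decide (pvCnt nums t i = j + 1) && ! decide (nums.getD t 0 < nums.getD i 0))
      ++ (List.range i).filter
        (fun t => decide (pvCnt nums t i = j) && decide (nums.getD t 0 < nums.getD i 0))
    = (List.range i).filter (fun t => decide (pvCnt nums t (i+1) = j + 1)) := by
  refine pv_sorted_eq ?_ (pv_pairwise_filter_range _ i) ?_
  · rw [List.pairwise_append]
    refine ⟨pv_pairwise_filter_range _ i, pv_pairwise_filter_range _ i, ?_⟩
    intro a ha b hb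
    simp only [List.mem_filter, List.mem_range, Bool.and_eq_true, Bool.not_eq_true',
      decide_eq_true_eq, decide_eq_false_iff_not] at ha hb
    by_contra hba
    have hba' : b ≤ a := by omega
    rcases Nat.lt_or_ge b a with hlt | hge
    · have hv : nums.getD b 0 < nums.getD a 0 :=
        lt_of_lt_of_le hb.2.2 (not_lt.mp ha.2.2)
      have := pv_cnt_mono hlt ha.1 hv
      omega
    · have : a = b := by omega
      subst this
      exact ha.2.2 hb.2.2
  · intro t
    simp only [List.mem_append, List.mem_filter, List.mem_range, Bool.and_eq_true,
      Bool.not_eq_true', decide_eq_true_eq, decide_eq_false_iff_not]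
    constructor
    · rintro (⟨ht, hc, hnl⟩ | ⟨ht, hc, hl⟩)
      · refine ⟨ht, ?_⟩; rw [pv_cnt_succ ht, if_neg hnl]; omega
      · refine ⟨ht, ?_⟩; rw [pv_cnt_succ ht, if_pos hl]; omega
    · rintro ⟨ht, hc⟩
      rw [pv_cnt_succ ht] at hc
      by_cases hl : nums.getD t 0 < nums.getD i 0
      · rw [if_pos hl] at hc
        right; exact ⟨ht, by omega, hl⟩
      · rw [if_neg hl] at hc
        left; exact ⟨ht, by omega, hl⟩

lemma pv_stk_succ (nums : List Int) (i j : Nat) :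
    pvStk nums (j+1) (i+1) =
      ((List.range i).filter (fun t => decide (pvCnt nums t (i+1) = j + 1))).reverse := by
  unfold pvStk
  rw [List.range_succ, List.filter_append]
  have h0 : pvCnt nums i (i+1) = 0 := pv_cnt_zero (by omega)
  simp [List.filter_singleton, h0]

lemma pv_stk0_succ (nums : List Int) (i : Nat) :
    pvStk nums 0 (i+1) = i :: pvStkMid nums 0 i := by
  unfold pvStk pvStkMid
  rw [List.range_succ, List.filter_append]
  have h0 : pvCnt nums i (i+1) = 0 := pv_cnt_zero (by omega)
  have hf : (List.range i).filter (fun t => decide (pvCnt nums t (i+1) = 0)) =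
      (List.range i).filter
        (fun t => decide (pvCnt nums t i = 0) && ! decide (nums.getD t 0 < nums.getD i 0)) := by
    refine List.filter_congr ?_
    intro t ht
    simp only [List.mem_range] at ht
    rw [pv_cnt_succ ht]
    by_cases hl : nums.getD t 0 < nums.getD i 0
    · rw [if_pos hl, decide_eq_true hl]
      have h1 : ¬ (pvCnt nums t i + 1 = 0) := by omega
      simp [h1]
    · rw [if_neg hl, decide_eq_false hl]
      simp
  simp [List.filter_singleton, h0, hf]

lemma pv_transfer_eq : ∀ (l st : List Nat), pvTransfer l st = l.reverse ++ st := by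
  intro l
  induction l with
  | nil => intro st; simp [pvTransfer]
  | cons a rest ih => intro st; simp [pvTransfer, ih]

lemma pv_foldl_cons : ∀ (l acc : List Nat),
    l.foldl (fun tm t => t :: tm) acc = l.reverse ++ acc := by
  intro l
  induction l with
  | nil => intro acc; simp
  | cons a rest ih => intro acc; simp [List.foldl_cons, ih]

lemma pv_feed (nums : List Int) (i j : Nat) :
    pvTransfer ((pvPopped nums j i).foldl (fun tm t => t :: tm) []) (pvStkMid nums (j+1) i)
      = pvStk nums (j+1) (i+1) := by
  rw [pv_foldl_cons, List.append_nil, pv_transfer_eq]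
  unfold pvPopped pvStkMid
  rw [List.reverse_reverse, ← List.reverse_append, pv_merge, ← pv_stk_succ]

lemma pv_getElem?_map_const (l : List Int) (m : Nat) (v : Int) :
    (l[m]?).map (fun _ => v) = if m < l.length then some v else none := by
  by_cases h : m < l.length
  · simp [List.getElem?_eq_getElem h, h]
  · simp [List.getElem?_eq_none (not_lt.mp h), h]

lemma pv_foldl_set_getElem? (v : Int) : ∀ (l : List Nat) (r : List Int) (m : Nat),
    (∀ t ∈ l, t < r.length) →
    (l.foldl (fun rr t => rr.set t v) r)[m]? =
      if m ∈ l then (r[m]?).map (fun _ => v) else r[m]? := by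
  intro l
  induction l with
  | nil => intro r m _; simp
  | cons a rest ih =>
    intro r m hb
    simp only [List.foldl_cons]
    rw [ih (r.set a v) m
      (fun t' ht' => by rw [List.length_set]; exact hb t' (List.mem_cons_of_mem a ht'))]
    by_cases hm : m ∈ rest
    · simp only [hm, if_true, List.mem_cons, or_true]
      rw [pv_getElem?_map_const, pv_getElem?_map_const, List.length_set]
    · by_cases hma : m = a
      · subst hma
        simp only [hm, if_false, List.mem_cons, true_or, if_true]
        have hlt : m < r.length := hb m (by simp)
        rw [List.getElem?_set, pv_getElem?_map_const]
        simp [hlt]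
      · simp only [hm, if_false, List.mem_cons]
        have hne : ¬ a = m := fun h => hma h.symm
        rw [List.getElem?_set, if_neg hne]
        simp [hma, hm]

lemma pv_resSpec_succ (nums : List Int) (kn n t i : Nat) (hk : 1 ≤ kn) :
    pvResSpec nums kn n t (i+1) =
      if t < i ∧ pvCnt nums t i = kn - 1 ∧ nums.getD t 0 < nums.getD i 0
      then Int.ofNat i else pvResSpec nums kn n t i := by
  have hlen : (pvKp nums t i).length = pvCnt nums t i := rfl
  by_cases hti : t < i
  · by_cases hl : nums.getD t 0 < nums.getD i 0
    · have hc : pvCnt nums t (i+1) = pvCnt nums t i + 1 := by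
        rw [pv_cnt_succ hti, if_pos hl]
      have hK : pvKp nums t (i+1) = pvKp nums t i ++ [i] := by
        rw [pv_Kp_succ hti, if_pos hl]
      by_cases hkc : pvCnt nums t i = kn - 1
      · rw [if_pos ⟨hti, hkc, hl⟩]
        unfold pvResSpec
        rw [if_pos (by omega : kn ≤ pvCnt nums t (i+1)), hK]
        simp only [List.getD]
        rw [List.getElem?_append_right (by omega)]
        have h2 : kn - 1 - (pvKp nums t i).length = 0 := by omega
        rw [h2]
        simp
      · rw [if_neg (fun h => hkc h.2.1)]
        unfold pvResSpec
        by_cases hge : kn ≤ pvCnt nums t i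
        · rw [if_pos (by omega : kn ≤ pvCnt nums t (i+1)), if_pos hge, hK]
          simp only [List.getD]
          rw [List.getElem?_append_left (by omega)]
        · rw [if_neg (by omega : ¬ kn ≤ pvCnt nums t (i+1)), if_neg hge]
    · have hc : pvCnt nums t (i+1) = pvCnt nums t i := by
        rw [pv_cnt_succ hti, if_neg hl]
        rfl
      have hK : pvKp nums t (i+1) = pvKp nums t i := by
        rw [pv_Kp_succ hti, if_neg hl]
        simp
      rw [if_neg (fun h => hl h.2.2)]
      unfold pvResSpec
      rw [hc, hK]
  · have hK : pvKp nums t (i+1) = pvKp nums t i := pv_Kp_ge (not_lt.mp hti)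
    have hc : pvCnt nums t (i+1) = pvCnt nums t i := by unfold pvCnt; rw [hK]
    rw [if_neg (fun h => hti h.1)]
    unfold pvResSpec
    rw [hc, hK]

lemma pv_getElem?_map_range {α : Type} (f : Nat → α) (kn m : Nat) :
    ((List.range kn).map f)[m]? = if m < kn then some (f m) else none := by
  by_cases h : m < kn
  · rw [List.getElem?_eq_getElem (by simpa using h)]
    simp [h]
  · rw [List.getElem?_eq_none (by simpa using not_lt.mp h)]
    simp [h]

lemma pv_res_update (nums : List Int) (kn n i : Nat) (hk : 1 ≤ kn) (hin : i ≤ n) :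
    (pvPopped nums (kn-1) i).foldl (fun rr t => rr.set t (Int.ofNat i)) (pvResL nums kn n i)
      = pvResL nums kn n (i+1) := by
  have hlen : (pvResL nums kn n i).length = n := by simp [pvResL]
  apply List.ext_getElem?
  intro m
  rw [pv_foldl_set_getElem? _ _ _ m ?side]
  case side =>
    intro t ht
    simp only [pvPopped, List.mem_reverse, List.mem_filter, List.mem_range] at ht
    omega
  have hmem : m ∈ pvPopped nums (kn-1) i ↔
      (m < i ∧ pvCnt nums m i = kn - 1 ∧ nums.getD m 0 < nums.getD i 0) := by
    simp [pvPopped, List.mem_reverse, List.mem_filter, List.mem_range, and_assoc]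
  by_cases hm : m < n
  · have hR : (pvResL nums kn n (i+1))[m]? = some (pvResSpec nums kn n m (i+1)) := by
      simp [pvResL, pv_getElem?_map_range, hm]
    have hI : (pvResL nums kn n i)[m]? = some (pvResSpec nums kn n m i) := by
      simp [pvResL, pv_getElem?_map_range, hm]
    rw [hR, pv_resSpec_succ nums kn n m i hk]
    by_cases hc : m < i ∧ pvCnt nums m i = kn - 1 ∧ nums.getD m 0 < nums.getD i 0
    · rw [if_pos (hmem.mpr hc), if_pos hc, hI]
      simp
    · rw [if_neg (fun h => hc (hmem.mp h)), if_neg hc, hI]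
  · have h1 : ¬ m ∈ pvPopped nums (kn-1) i := fun h => by
      have := (hmem.mp h).1; omega
    rw [if_neg h1]
    simp [pvResL, pv_getElem?_map_range, hm]

lemma pv_getD_map_range {α : Type} (f : Nat → α) {kn j : Nat} (h : j < kn) (d : α) :
    ((List.range kn).map f).getD j d = f j := by
  simp [List.getD, pv_getElem?_map_range, h]

lemma pv_set_map_range {α : Type} (f : Nat → α) (kn j : Nat) (v : α) :
    ((List.range kn).map f).set j v =
      (List.range kn).map (fun j' => if j' = j then v else f j') := by
  apply List.ext_getElem?
  intro m
  rw [List.getElem?_set]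
  simp only [pv_getElem?_map_range, List.length_map, List.length_range]
  by_cases hm : m < kn
  · by_cases hjm : j = m
    · subst hjm; simp [hm]
    · have hne : ¬ m = j := fun h => hjm h.symm
      rw [if_neg hjm]
      simp [hm, hne]
  · by_cases hjm : j = m
    · subst hjm; simp [hm]
    · rw [if_neg hjm]
      simp [hm]

lemma pv_agetD (l : List (List Nat)) (j : Nat) : l.toArray.getD j [] = l.getD j [] := by
  simp [Array.getD_eq_getD_getElem?, List.getElem?_toArray, List.getD]

lemma pv_aset (l : List (List Nat)) (j : Nat) (v : List Nat) :
    l.toArray.setIfInBounds j v = (l.set j v).toArray := by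
  simp [List.setIfInBounds_toArray]

def pvStep (nums : List Int) (i kn j : Nat) (s : List Int × Array (List Nat) × List Nat) :
    List Int × Array (List Nat) × List Nat :=
  match s with
  | (rs, stks, tm0) =>
    let x := nums.getD i 0
    let pr := pvPops nums x (stks.getD j [])
    let stacks' := stks.setIfInBounds j pr.2
    let res' := if j = kn - 1 then pr.1.foldl (fun rr t => rr.set t (Int.ofNat i)) rs else rs
    let tmp' := if j = kn - 1 then tm0 else pr.1.foldl (fun tm t => t :: tm) tm0
    let st2 : Array (List Nat) × List Nat :=
      if j + 1 < kn then
        let recv := stacks'.getD (j+1) []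
        (stacks'.setIfInBounds (j+1) (pvTransfer tmp' recv), [])
      else (stacks', tmp')
    (res', st2.1, st2.2)

lemma pv_inner_zero (nums : List Int) (i kn : Nat) (s : List Int × Array (List Nat) × List Nat) :
    pvInner nums i kn 0 s = pvStep nums i kn 0 s := rfl

lemma pv_inner_succ (nums : List Int) (i kn j : Nat)
    (s : List Int × Array (List Nat) × List Nat) :
    pvInner nums i kn (j+1) s = pvInner nums i kn j (pvStep nums i kn (j+1) s) := rfl

lemma pv_step_char (nums : List Int) (kn n i : Nat) (hk : 1 ≤ kn) (hin : i ≤ n)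
    (j : Nat) (hj : j < kn) :
    pvStep nums i kn j
      ((if j = kn - 1 then pvResL nums kn n i else pvResL nums kn n (i+1)),
        (pvPreSt nums kn i j).toArray, ([] : List Nat))
    = (pvResL nums kn n (i+1),
       (if j = 0 then pvPostSt nums kn i else pvPreSt nums kn i (j-1)).toArray,
       ([] : List Nat)) := by
  have hget : (pvPreSt nums kn i j).getD j [] = pvStk nums j i := by
    unfold pvPreSt
    rw [pv_getD_map_range _ hj]
    simp
  simp only [pvStep, pv_agetD, pv_aset, hget, pv_pops_stk]
  by_cases hlt : j + 1 < kn
  · have hjk : ¬ (j = kn - 1) := by omega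
    rw [if_neg hjk, if_neg hjk, if_neg hjk, if_pos hlt]
    have hget2 : ((pvPreSt nums kn i j).set j (pvStkMid nums j i)).getD (j+1) []
        = pvStkMid nums (j+1) i := by
      unfold pvPreSt
      rw [pv_set_map_range, pv_getD_map_range _ hlt]
      have e1 : ¬ (j + 1 = j) := by omega
      have e2 : ¬ (j + 1 ≤ j) := by omega
      simp [e1, e2]
    rw [hget2, pv_feed]
    refine congrArg₂ Prod.mk rfl (congrArg₂ Prod.mk (congrArg List.toArray ?_) rfl)
    dsimp only
    unfold pvPreSt
    rw [pv_set_map_range, pv_set_map_range]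
    by_cases hj0 : j = 0
    · subst hj0
      rw [if_pos rfl]
      unfold pvPostSt
      refine List.map_congr_left ?_
      intro j' hj'
      simp only [List.mem_range] at hj'
      by_cases e1 : j' = 1
      · subst e1; simp
      · by_cases e2 : j' = 0
        · subst e2; simp
        · simp [e1, e2, (by omega : ¬ j' ≤ 0)]
    · rw [if_neg hj0]
      have hj1 : j - 1 + 1 = j := by omega
      simp only [hj1]
      refine List.map_congr_left ?_
      intro j' hj'
      simp only [List.mem_range] at hj'
      by_cases e1 : j' = j + 1
      · subst e1
        simp [(by omega : ¬ j + 1 = j), (by omega : ¬ j + 1 ≤ j),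
          (by omega : ¬ j + 1 ≤ j - 1)]
      · by_cases e2 : j' = j
        · subst e2
          simp
          intro h
          exact absurd h (by omega)
        · by_cases e3 : j' ≤ j
          · simp [e1, e2, e3, (by omega : j' ≤ j - 1)]
          · simp [e1, e2, e3]
            intro h
            exact absurd h (by omega)
  · have hjk : j = kn - 1 := by omega
    rw [if_pos hjk, if_pos hjk, if_pos hjk, if_neg hlt]
    have hres : (pvPopped nums j i).foldl (fun rr t => rr.set t (Int.ofNat i))
        (pvResL nums kn n i) = pvResL nums kn n (i+1) := by
      rw [hjk]; exact pv_res_update nums kn n i hk hin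
    rw [hres]
    refine congrArg₂ Prod.mk rfl (congrArg₂ Prod.mk (congrArg List.toArray ?_) rfl)
    dsimp only
    unfold pvPreSt
    rw [pv_set_map_range]
    by_cases hj0 : j = 0
    · subst hj0
      rw [if_pos rfl]
      unfold pvPostSt
      refine List.map_congr_left ?_
      intro j' hj'
      simp only [List.mem_range] at hj'
      have e1 : j' = 0 := by omega
      subst e1
      simp
    · rw [if_neg hj0]
      have hj1 : j - 1 + 1 = j := by omega
      simp only [hj1]
      refine List.map_congr_left ?_
      intro j' hj'
      simp only [List.mem_range] at hj'
      by_cases e2 : j' = j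
      · subst e2
        simp
        intro h
        exact absurd h (by omega)
      · have e3 : j' ≤ j := by omega
        simp [e2, e3, (by omega : j' ≤ j - 1)]

lemma pv_inner_inv (nums : List Int) (n kn i : Nat) (hk : 1 ≤ kn) (hin : i ≤ n) :
    ∀ j, j < kn →
    pvInner nums i kn j
      ((if j = kn - 1 then pvResL nums kn n i else pvResL nums kn n (i+1)),
        (pvPreSt nums kn i j).toArray, ([] : List Nat))
    = (pvResL nums kn n (i+1), (pvPostSt nums kn i).toArray, ([] : List Nat)) := by
  intro j
  induction j with
  | zero =>
    intro hj
    rw [pv_inner_zero, pv_step_char nums kn n i hk hin 0 hj]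
    simp
  | succ j ih =>
    intro hj
    rw [pv_inner_succ, pv_step_char nums kn n i hk hin (j+1) hj]
    have h1 : ¬ (j + 1 = 0) := by omega
    have h2 : j + 1 - 1 = j := by omega
    rw [if_neg h1, h2]
    have h3 : ¬ (j = kn - 1) := by omega
    have h4 := ih (by omega)
    rw [if_neg h3] at h4
    exact h4

lemma pv_res0 (nums : List Int) (kn n : Nat) (hk : 1 ≤ kn) :
    List.replicate n (Int.ofNat n) = pvResL nums kn n 0 := by
  apply List.ext_getElem?
  intro m
  rw [List.getElem?_replicate]
  simp only [pvResL, pv_getElem?_map_range]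
  by_cases hm : m < n
  · rw [if_pos hm, if_pos hm]
    have h0 : pvCnt nums m 0 = 0 := pv_cnt_zero (by omega)
    unfold pvResSpec
    rw [h0, if_neg (by omega)]
  · rw [if_neg hm, if_neg hm]

lemma pv_stacks0 (nums : List Int) (kn : Nat) :
    List.replicate kn ([] : List Nat) = pvStacks nums kn 0 := by
  apply List.ext_getElem?
  intro m
  rw [List.getElem?_replicate]
  simp only [pvStacks, pv_getElem?_map_range]
  by_cases hm : m < kn
  · rw [if_pos hm, if_pos hm]
    simp [pvStk]
  · rw [if_neg hm, if_neg hm]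

lemma pv_pre_top (nums : List Int) (kn i : Nat) (hk : 1 ≤ kn) :
    pvPreSt nums kn i (kn - 1) = pvStacks nums kn i := by
  unfold pvPreSt pvStacks
  refine List.map_congr_left ?_
  intro j' hj'
  simp only [List.mem_range] at hj'
  rw [if_pos (by omega : j' ≤ kn - 1)]

lemma pv_post_set (nums : List Int) (kn i : Nat) (hk : 1 ≤ kn) :
    (pvPostSt nums kn i).set 0 (i :: (pvPostSt nums kn i).getD 0 []) = pvStacks nums kn (i+1) := by
  unfold pvPostSt
  rw [pv_getD_map_range _ (by omega : 0 < kn)]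
  rw [if_pos rfl, pv_set_map_range]
  unfold pvStacks
  refine List.map_congr_left ?_
  intro j' hj'
  by_cases h0 : j' = 0
  · subst h0
    rw [if_pos rfl, ← pv_stk0_succ]
  · rw [if_neg h0, if_neg h0]

lemma pv_outer (nums : List Int) (kn : Nat) (hk : 1 ≤ kn) :
    ∀ i, i ≤ nums.length →
    (List.range i).foldl
      (fun (s : List Int × Array (List Nat) × List Nat) i' =>
        let s' := if kn = 0 then s else pvInner nums i' kn (kn - 1) s
        match s' with
        | (rs, stks, tm0) =>
          let h0 := stks.getD 0 []
          (rs, stks.setIfInBounds 0 (i' :: h0), tm0))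
      (List.replicate nums.length (Int.ofNat nums.length),
        (List.replicate kn ([] : List Nat)).toArray, [])
    = (pvResL nums kn nums.length i, (pvStacks nums kn i).toArray, []) := by
  intro i
  induction i with
  | zero =>
    intro _
    rw [List.range_zero, List.foldl_nil, pv_res0 nums kn nums.length hk, pv_stacks0 nums kn]
  | succ i ih =>
    intro hle
    rw [List.range_succ, List.foldl_append, ih (by omega), List.foldl_cons, List.foldl_nil]
    have hk0 : ¬ (kn = 0) := by omega
    have hiv := pv_inner_inv nums nums.length kn i hk (by omega) (kn-1) (by omega)
    have he : (if kn - 1 = kn - 1 then pvResL nums kn nums.length i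
        else pvResL nums kn nums.length (i+1)) = pvResL nums kn nums.length i := if_pos rfl
    rw [he, pv_pre_top nums kn i hk] at hiv
    simp only [if_neg hk0, hiv, pv_agetD, pv_aset]
    rw [pv_post_set nums kn i hk]

lemma pv_foldl_append_map {α : Type} (g : Nat → α) : ∀ (l : List Nat) (acc : List α),
    l.foldl (fun r a => r ++ [g a]) acc = acc ++ l.map g := by
  intro l
  induction l with
  | nil => intro acc; simp
  | cons a rest ih => intro acc; simp [List.foldl_cons, ih]

lemma pv_alt_char (nums : List Int) (k x : Int) : ∀ (l : List Nat) (cnt ans : Int),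
    0 ≤ cnt → cnt < k →
    pvAltInner nums k x l cnt ans =
      (if k ≤ cnt + ((l.filter (fun j => decide (x < nums.getD j 0))).length : Int) then
        Int.ofNat ((l.filter (fun j => decide (x < nums.getD j 0))).getD ((k - cnt - 1).toNat) 0)
      else ans) := by
  intro l
  induction l with
  | nil =>
    intro cnt ans h0 hlt
    simp only [pvAltInner, List.filter_nil, List.length_nil]
    rw [if_neg (by omega)]
  | cons a rest ih =>
    intro cnt ans h0 hlt
    simp only [pvAltInner, List.filter_cons]
    by_cases hp : x < nums.getD a 0
    · rw [if_pos hp, if_pos (decide_eq_true hp)]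
      simp only [List.length_cons]
      by_cases he : cnt + 1 = k
      · rw [if_pos he, if_pos (by push_cast; omega)]
        have h1 : (k - cnt - 1).toNat = 0 := by omega
        rw [h1, List.getD_cons_zero]
      · rw [if_neg he, ih _ _ (by omega) (by omega)]
        by_cases hcond : k ≤ cnt + 1 +
            ((rest.filter (fun j => decide (x < nums.getD j 0))).length : Int)
        · rw [if_pos hcond, if_pos (by push_cast at hcond ⊢; omega)]
          have h2 : (k - cnt - 1).toNat = (k - (cnt + 1) - 1).toNat + 1 := by omega
          rw [h2, List.getD_cons_succ]
        · rw [if_neg hcond, if_neg (by push_cast at hcond ⊢; omega)]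
    · rw [if_neg hp, if_neg (fun hco => hp (of_decide_eq_true hco))]
      exact ih _ _ h0 hlt

theorem kthGreaterElement_spec : Claim_equal_kthGreaterElement := by
  intro nums k _ hpre
  unfold Spec_kthGreaterElement
  by_cases hk1 : 1 ≤ k
  · have hkn : 1 ≤ k.toNat := by omega
    have hA : kthGreaterElement nums k = pvResL nums k.toNat nums.length nums.length := by
      simp only [kthGreaterElement]
      rw [pv_outer nums k.toNat hkn nums.length le_rfl]
    have hB : kthGreaterElement_alt nums k = pvResL nums k.toNat nums.length nums.length := by
      simp only [kthGreaterElement_alt]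
      rw [pv_foldl_append_map, List.nil_append]
      unfold pvResL
      refine List.map_congr_left ?_
      intro i hi
      rw [pv_alt_char nums k (nums.getD i 0) _ 0 _ le_rfl (by omega)]
      have hkeq : ((List.range' (i+1) (nums.length - (i+1))).filter
          (fun j => decide (nums.getD i 0 < nums.getD j 0))) = pvKp nums i nums.length := rfl
      rw [hkeq]
      unfold pvResSpec
      have hlen : (pvKp nums i nums.length).length = pvCnt nums i nums.length := rfl
      by_cases hc : k.toNat ≤ pvCnt nums i nums.length
      · rw [if_pos (by omega :
            k ≤ 0 + ((pvKp nums i nums.length).length : Int)), if_pos hc]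
        have hix : (k - 0 - 1).toNat = k.toNat - 1 := by omega
        rw [hix]
      · rw [if_neg (by omega :
            ¬ k ≤ 0 + ((pvKp nums i nums.length).length : Int)), if_neg hc]
    rw [hA, hB]
  · have hnil : nums = [] := by
      rcases hpre with h | h
      · exact h
      · omega
    subst hnil
    simp [kthGreaterElement, kthGreaterElement_alt]

theorem kthGreaterElement_raises : Claim_raises_kthGreaterElement := by
  unfold Claim_raises_kthGreaterElement
  refine ⟨fun nums k _ hr hp => ?_, by decide⟩
  have hk := hr.2
  rcases hp with h | h
  · exact hr.1 h
  · omega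

-- self-check: the raise witness does satisfy Raises_ and B's port returns the stated value there
theorem pvRaisesWitness_ok :
    Raises_kthGreaterElement pvRaiseWitness_kthGreaterElement.1 pvRaiseWitness_kthGreaterElement.2 ∧
    kthGreaterElement_alt pvRaiseWitness_kthGreaterElement.1 pvRaiseWitness_kthGreaterElement.2 =
      pvRaiseWitnessOut_kthGreaterElement :=
  ⟨kthGreaterElement_raises.2.2.1, kthGreaterElement_raises.2.2.2⟩
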